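-- pv_equiv track=rewrite | github.com/Shinipsae/CosPro | Test/test02.py | solution7
-- ===== SOURCE A (Python) =====
-- def solution7(s):
--     answer = []
--     for c in s:
--         if '0' <= c <= '9': # 한번에 표현 가능
--             n = ord('i') - ord(c) # ord -> char to ASCII code
--             c = chr(n) # chr -> ASCII code to ord
--         answer.append(c)
--     return ''.join(answer)
-- ===== SOURCE B (Python) =====
-- def solution7(s):
--     # Complement each maximal digit run arithmetically: a run of k digits with
--     # value v becomes the k-digit representation of (10**k - 1 - v), which is
--     # exactly the per-digit 9-complement (no borrows occur).
--     parts = []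
--     i = 0
--     n = len(s)
--     while i < n:
--         if '0' <= s[i] <= '9':
--             v = 0
--             j = i
--             while j < n and '0' <= s[j] <= '9':
--                 v = 10 * v + (ord(s[j]) - 48)
--                 j += 1
--             k = j - i
--             w = 10 ** k - 1 - v
--             out = []
--             for _ in range(k):
--                 w, r = divmod(w, 10)
--                 out.append(chr(48 + r))
--             parts.append(''.join(reversed(out)))
--             i = j
--         else:
--             parts.append(s[i])
--             i += 1
--     return ''.join(parts)
-- ===== Notes on version B (the rewrite author's own statement) =====
-- stated objective: alternative
-- what changed: Instead of mapping characters one by one, B scans for maximal digit runs, parses each run to an integer v, computes the arithmetic nines'-complement 10**k - 1 - v, and re-emits its k digits with divmod; non-digit characters pass through between runs.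
import Mathlib
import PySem

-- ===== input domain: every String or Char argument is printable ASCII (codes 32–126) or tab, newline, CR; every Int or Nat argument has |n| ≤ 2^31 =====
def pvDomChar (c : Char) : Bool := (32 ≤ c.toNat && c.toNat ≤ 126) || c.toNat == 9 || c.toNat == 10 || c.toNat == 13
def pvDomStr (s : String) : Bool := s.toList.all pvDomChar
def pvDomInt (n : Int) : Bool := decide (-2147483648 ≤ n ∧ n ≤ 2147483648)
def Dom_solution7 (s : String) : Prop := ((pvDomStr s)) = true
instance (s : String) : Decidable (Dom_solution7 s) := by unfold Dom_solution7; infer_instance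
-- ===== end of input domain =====

-- B replaces A's per-character branch-and-map loop by an arithmetic algorithm on maximal
-- digit runs: each run of k digits with value v is rewritten as the k digits of 10^k-1-v
-- (alternative decomposition; return values proved equal).


-- ===== PORT A =====
-- loop over chars, appending either chr(105 - ord(c)) for digits or c unchanged
def solution7 (s : String) : String :=
  String.ofList (s.toList.foldl
    (fun answer c =>
      answer ++ [if '0' ≤ c ∧ c ≤ '9' then Char.ofNat (105 - c.toNat) else c]) [])

-- ===== PORT B =====
-- inner while loop 'v = 10*v + (ord(s[j]) - 48); j += 1' over the digit run,
-- carrying (v, run length, remaining suffix)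
def pvRun : List Char → Int → Nat → Int × Nat × List Char
  | [], v, k => (v, k, [])
  | c :: cs, v, k =>
    if '0' ≤ c ∧ c ≤ '9' then pvRun cs (10 * v + ((c.toNat : Int) - 48)) (k + 1)
    else (v, k, c :: cs)

-- 'for _ in range(k): w, r = divmod(w, 10); out.append(chr(48 + r))' — low digits first
def pvEmitLow : Nat → Int → List Char
  | 0, _ => []
  | k + 1, w =>
    Char.ofNat (48 + PySem.Int.mod w 10).toNat :: pvEmitLow k (PySem.Int.floordiv w 10)

-- the run consumed by pvRun is a prefix, so the suffix is no longer than the input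
-- (needed by pvGo's termination)
theorem pvRun_rest_le (cs : List Char) (v : Int) (k : Nat) :
    (pvRun cs v k).2.2.length ≤ cs.length := by
  induction cs generalizing v k with
  | nil => simp [pvRun]
  | cons c t ih =>
    by_cases h : '0' ≤ c ∧ c ≤ '9'
    · simp only [pvRun, if_pos h]
      exact le_trans (ih _ _) (Nat.le_succ _)
    · simp [pvRun, if_neg h]

-- outer while loop over the string: digit-run branch vs pass-through branch
def pvGo : List Char → List Char
  | [] => []
  | c :: cs =>
    if h : '0' ≤ c ∧ c ≤ '9' then
      let r := pvRun (c :: cs) 0 0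
      (pvEmitLow r.2.1 (10 ^ r.2.1 - 1 - r.1)).reverse ++ pvGo r.2.2
    else c :: pvGo cs
  termination_by cs => cs.length
  decreasing_by
  · simp only [pvRun, if_pos h]
    exact Nat.lt_succ_of_le (pvRun_rest_le cs _ _)
  · simp

def solution7_alt (s : String) : String := String.ofList (pvGo s.toList)

-- ===== PRECONDITION & SPEC =====
def Spec_solution7 (s : String) (out : String) : Prop := out = solution7_alt s
instance (s : String) (out : String) : Decidable (Spec_solution7 s out) := by unfold Spec_solution7; infer_instance

-- ===== CLAIM (what is proved, stated in full; the proofs are below) =====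
def Claim_equal_solution7 : Prop := ∀ (s : String), Dom_solution7 s → Spec_solution7 s (solution7 s)

-- ===== LEMMAS AND PROOFS =====

-- A's per-character transform
def pvF (c : Char) : Char := if '0' ≤ c ∧ c ≤ '9' then Char.ofNat (105 - c.toNat) else c

abbrev pvIsDig (c : Char) : Prop := '0' ≤ c ∧ c ≤ '9'

-- Horner value of a digit list, most significant first
def pvVal : List Char → Int
  | [] => 0
  | c :: cs => ((c.toNat : Int) - 48) * 10 ^ cs.length + pvVal cs

theorem pvVal_append_singleton (ds : List Char) (d : Char) :
    pvVal (ds ++ [d]) = 10 * pvVal ds + ((d.toNat : Int) - 48) := by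
  induction ds with
  | nil => simp [pvVal]
  | cons c t ih => simp [pvVal, ih]; ring

-- pvRun computes the Horner value and length of the maximal digit prefix and returns the rest
theorem pvRun_spec (cs : List Char) (v : Int) (k : Nat) :
    pvRun cs v k =
      (v * 10 ^ (cs.takeWhile (fun c => decide (pvIsDig c))).length
         + pvVal (cs.takeWhile (fun c => decide (pvIsDig c))),
       k + (cs.takeWhile (fun c => decide (pvIsDig c))).length,
       cs.dropWhile (fun c => decide (pvIsDig c))) := by
  induction cs generalizing v k with
  | nil => simp [pvRun, pvVal]
  | cons c t ih =>
    by_cases h : pvIsDig c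
    · have h' : '0' ≤ c ∧ c ≤ '9' := h
      simp only [pvRun, if_pos h', List.takeWhile_cons, List.dropWhile_cons, decide_eq_true h,
        if_pos]
      rw [ih]
      refine Prod.ext ?_ (Prod.ext ?_ rfl)
      · simp [pvVal]; ring
      · simp; omega
    · have h' : ¬('0' ≤ c ∧ c ≤ '9') := h
      have hb : (decide ('0' ≤ c) && decide (c ≤ '9')) = false := by
        simpa [decide_eq_true_eq] using h'
      simp [pvRun, if_neg h', hb, pvVal]

-- emitting k digits of 10^k - 1 - v reproduces the per-digit 9-complement of the run
theorem pvEmit_run (ds : List Char) (hds : ∀ c ∈ ds, pvIsDig c) :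
    (pvEmitLow ds.length (10 ^ ds.length - 1 - pvVal ds)).reverse = ds.map pvF := by
  induction ds using List.reverseRecOn with
  | nil => simp [pvEmitLow]
  | append_singleton t d ih =>
    have hd : pvIsDig d := hds d (by simp)
    have hdl : 48 ≤ d.toNat := hd.1
    have hdu : d.toNat ≤ 57 := hd.2
    have hw : 10 ^ (t.length + 1) - 1 - pvVal (t ++ [d])
        = 10 * (10 ^ t.length - 1 - pvVal t) + (57 - (d.toNat : Int)) := by
      rw [pvVal_append_singleton]
      simp [pow_succ]; ring
    have hr0 : (0:Int) ≤ 57 - (d.toNat : Int) := by omega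
    have hr9 : (57 - (d.toNat : Int)) < 10 := by omega
    have hmod : PySem.Int.mod (10 ^ (t.length + 1) - 1 - pvVal (t ++ [d])) 10
        = 57 - (d.toNat : Int) := by
      rw [hw, PySem.Int.mod_eq_emod_of_pos (by norm_num)]
      rw [Int.add_comm, Int.add_mul_emod_self_left]
      exact Int.emod_eq_of_lt hr0 hr9
    have hdiv : PySem.Int.floordiv (10 ^ (t.length + 1) - 1 - pvVal (t ++ [d])) 10
        = 10 ^ t.length - 1 - pvVal t := by
      rw [hw, PySem.Int.floordiv_eq_ediv_of_pos (by norm_num)]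
      rw [Int.add_comm, Int.add_mul_ediv_left _ _ (by norm_num : (10:Int) ≠ 0)]
      rw [Int.ediv_eq_zero_of_lt hr0 hr9]
      ring
    have hlen : (t ++ [d]).length = t.length + 1 := by simp
    rw [hlen, pvEmitLow, hmod, hdiv, List.reverse_cons,
      ih (fun c hc => hds c (by simp [hc])), List.map_append]
    have hchar : Char.ofNat (48 + (57 - (d.toNat : Int))).toNat = pvF d := by
      unfold pvF
      have hd' : '0' ≤ d ∧ d ≤ '9' := hd
      rw [if_pos hd']
      congr 1
      omega
    simp [hchar]

-- the outer loop equals A's per-character map (strong induction via a length bound,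
-- since the digit branch recurses on the dropWhile suffix)
theorem pvGo_eq_map_aux : ∀ (n : Nat) (cs : List Char), cs.length ≤ n → pvGo cs = cs.map pvF := by
  intro n
  induction n with
  | zero =>
    intro cs h
    have hnil : cs = [] := List.eq_nil_of_length_eq_zero (Nat.le_zero.mp h)
    subst hnil
    simp [pvGo]
  | succ n ih =>
    intro cs hlen
    match cs with
    | [] => simp [pvGo]
    | c :: cs =>
      by_cases h : '0' ≤ c ∧ c ≤ '9'
      · have hdig : (decide (pvIsDig c)) = true := decide_eq_true h
        rw [pvGo]
        simp only [dif_pos h]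
        rw [pvRun_spec]
        simp only
        set p : Char → Bool := fun c => decide (pvIsDig c) with hp
        have hzero : (0:Int) * 10 ^ ((c :: cs).takeWhile p).length
            + pvVal ((c :: cs).takeWhile p) = pvVal ((c :: cs).takeWhile p) := by ring
        have hall : ∀ x ∈ (c :: cs).takeWhile p, pvIsDig x := by
          intro x hx
          have h2 : p x = true := List.mem_takeWhile_imp hx
          simpa [hp] using h2
        have hdrop : (c :: cs).dropWhile p = cs.dropWhile p := by
          simp [hp, h.1, h.2]
        have hrest : ((c :: cs).dropWhile p).length ≤ n := by
          rw [hdrop]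
          exact le_trans (List.length_dropWhile_le _ _) (by simpa using Nat.succ_le_succ_iff.mp hlen)
        rw [Nat.zero_add, hzero, pvEmit_run _ hall, ih _ hrest, ← List.map_append,
          List.takeWhile_append_dropWhile]
      · rw [pvGo]
        simp only [dif_neg h]
        rw [ih cs (by simpa using Nat.succ_le_succ_iff.mp hlen)]
        simp [pvF, if_neg h]

theorem pvGo_eq_map (cs : List Char) : pvGo cs = cs.map pvF := pvGo_eq_map_aux cs.length cs le_rfl

-- ===== VERDICT (by name: the statement is the Claim_ definition above) =====
theorem solution7_spec : Claim_equal_solution7 := by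
  intro s _
  unfold Spec_solution7 solution7 solution7_alt
  rw [PySem.List.foldl_append_singleton_eq_map, pvGo_eq_map]
  rfl
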